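-- pv_equiv track=rewrite | github.com/pypi-data/pypi-mirror-217 | packages/good-converter/good_converter-0.2-py3-none-any.whl/converter/ann_converter.py | turnFullListToOutputPair
-- ===== SOURCE A (Python) =====
-- def outputWithTagScheme(input_list, label, tagScheme="BMES"):
--     output_list = []
--     list_length = len(input_list)
--     if tagScheme == "BMES":
--         if list_length == 1:
--             pair = input_list[0] + ' ' + 'S-' + label + '\n'
--             output_list.append(pair)
--         else:
--             for idx in range(list_length):
--                 if idx == 0:
--                     pair = input_list[idx] + ' ' + 'B-' + label + '\n'
--                 elif idx == list_length - 1: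
--                     pair = input_list[idx] + ' ' + 'E-' + label + '\n'
--                 else:
--                     pair = input_list[idx] + ' ' + 'M-' + label + '\n'
--                 output_list.append(pair)
--     else:  # BIO
--         for idx in range(list_length):
--             if idx == 0:
--                 pair = input_list[idx] + ' ' + 'B-' + label + '\n'
--             else:
--                 pair = input_list[idx] + ' ' + 'I-' + label + '\n'
--             output_list.append(pair)
--     return output_list
--
-- def turnFullListToOutputPair(fullList, segmented=True, tagScheme="BMES", onlyNP=False):
--     pair_list = []
--     for chunk_words, start, end, is_tagged in fullList:
--         if is_tagged:
--             plain_words, label = chunk_words.strip('[@$]').rsplit('#', 1)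
--             label = label.strip('*')
--             if segmented:
--                 plain_words = plain_words.split()
--             if onlyNP:
--                 label = "NP"
--             outList = outputWithTagScheme(plain_words, label, tagScheme)
--             pair_list.extend(outList)
--         else:
--             if segmented:
--                 words = chunk_words.split()
--             else:
--                 words = chunk_words  # actually chars
--             for word_or_char in words:
--                 if word_or_char == ' ':
--                     continue
--                 pair = word_or_char + ' ' + 'O\n'
--                 pair_list.append(pair)
--     return pair_list
-- ===== SOURCE B (Python) =====
-- def turnFullListToOutputPair(fullList, segmented=True, tagScheme="BMES", onlyNP=False):
--     # Streaming emit-then-patch over a flat (word, tag) token stream: every tagged word is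
--     # emitted assuming its chunk continues ('B-' first, then 'M-'/'I-'); at each tagged-chunk
--     # boundary the last emitted tag is retroactively patched for BMES ('B'->'S', 'M'->'E').
--     # A second pass formats the pairs into lines.
--     bmes = tagScheme == "BMES"
--     toks = []
--     for chunk_words, start, end, is_tagged in fullList:
--         if is_tagged:
--             plain, label = chunk_words.strip('[@$]').rsplit('#', 1)
--             label = "NP" if onlyNP else label.strip('*')
--             words = plain.split() if segmented else plain
--             mark = len(toks)
--             first = True
--             for w in words:
--                 toks.append((w, ('B-' if first else ('M-' if bmes else 'I-')) + label))
--                 first = False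
--             if bmes and len(toks) > mark:
--                 w, t = toks[-1]
--                 toks[-1] = (w, ('S' if t.startswith('B') else 'E') + t[1:])
--         else:
--             for w in (chunk_words.split() if segmented else chunk_words):
--                 if w != ' ':
--                     toks.append((w, 'O'))
--     return [w + ' ' + t + '\n' for w, t in toks]
-- ===== Notes on version B (the rewrite author's own statement) =====
-- stated objective: alternative
-- what changed: Instead of A's per-chunk index loop with first/last branching that appends finished lines, B streams every token into a flat (word, tag) pair list, tagging each tagged word as it arrives ('B-' first, then 'M-'/'I-') and retroactively patching the last tag of each BMES chunk at the chunk boundary ('B'->'S', 'M'->'E'), then formats all pairs in a separate final pass.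
import Mathlib
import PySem

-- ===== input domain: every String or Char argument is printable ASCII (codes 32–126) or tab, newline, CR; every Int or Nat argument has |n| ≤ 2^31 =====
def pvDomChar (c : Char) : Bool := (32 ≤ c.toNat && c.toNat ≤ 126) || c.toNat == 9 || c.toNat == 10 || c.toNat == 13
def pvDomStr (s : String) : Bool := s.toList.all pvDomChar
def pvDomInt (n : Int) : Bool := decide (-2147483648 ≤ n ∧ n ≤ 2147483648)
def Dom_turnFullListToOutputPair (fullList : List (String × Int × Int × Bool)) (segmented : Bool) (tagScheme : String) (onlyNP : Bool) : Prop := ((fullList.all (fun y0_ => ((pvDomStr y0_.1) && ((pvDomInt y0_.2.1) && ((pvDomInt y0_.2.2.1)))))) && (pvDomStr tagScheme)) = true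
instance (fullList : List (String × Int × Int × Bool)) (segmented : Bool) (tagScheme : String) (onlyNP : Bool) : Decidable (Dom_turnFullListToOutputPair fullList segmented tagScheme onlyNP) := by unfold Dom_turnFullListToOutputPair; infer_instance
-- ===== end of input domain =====

-- B replaces A's per-chunk index loop with first/last branching by a streaming emit-then-patch
-- pass building a flat (word, tag) token stream (last tag of a BMES chunk patched B->S / M->E
-- at the chunk boundary) plus a separate formatting pass — a different decomposition, same cost.


-- ===== PORT A =====
-- s.rsplit('#', 1) when '#' occurs in cs: split at the LAST '#'.  Hand port (PySem has no rsplit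
-- with maxsplit); exact whenever '#' ∈ cs, which Pre_ guarantees; otherwise Python raises
-- ValueError on the 2-tuple unpack and this returns a dummy ([], cs) outside Pre_.
def pvRsplit1 (cs : List Char) : List Char × List Char :=
  if '#' ∈ cs then
    let i := cs.length - 1 - (cs.reverse.idxOf '#')
    (cs.take i, cs.drop (i + 1))
  else ([], cs)

-- Python string iteration / indexing yields 1-char strings; a non-segmented chunk is ported as
-- the list of its characters as 1-char strings (exact).
def pvChars (s : String) : List String := s.toList.map (fun c => String.ofList [c])

def outputWithTagScheme (inputList : List String) (label : String) (tagScheme : String) : List String :=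
  let n := inputList.length
  if tagScheme = "BMES" then
    if n = 1 then
      [inputList.getD 0 "" ++ " " ++ "S-" ++ label ++ "\n"]
    else
      (List.range n).foldl (fun out idx =>
        out ++ [if idx = 0 then inputList.getD idx "" ++ " " ++ "B-" ++ label ++ "\n"
                else if idx = n - 1 then inputList.getD idx "" ++ " " ++ "E-" ++ label ++ "\n"
                else inputList.getD idx "" ++ " " ++ "M-" ++ label ++ "\n"]) []
  else
    (List.range n).foldl (fun out idx =>
      out ++ [if idx = 0 then inputList.getD idx "" ++ " " ++ "B-" ++ label ++ "\n"
              else inputList.getD idx "" ++ " " ++ "I-" ++ label ++ "\n"]) []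

def turnFullListToOutputPair (fullList : List (String × Int × Int × Bool)) (segmented : Bool) (tagScheme : String) (onlyNP : Bool) : List String :=
  fullList.foldl (fun pair_list chunk =>
    if chunk.2.2.2 then
      let pr := pvRsplit1 (PySem.Str.stripChars chunk.1 "[@$]").toList
      let label := PySem.Str.stripChars (String.ofList pr.2) "*"
      let plain_words := if segmented then PySem.Str.split₀ (String.ofList pr.1) else pvChars (String.ofList pr.1)
      let label := if onlyNP then "NP" else label
      pair_list ++ outputWithTagScheme plain_words label tagScheme
    else
      let words := if segmented then PySem.Str.split₀ chunk.1 else pvChars chunk.1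
      words.foldl (fun pl w => if w = " " then pl else pl ++ [w ++ " " ++ "O\n"]) pair_list) []

-- ===== PORT B =====
def turnFullListToOutputPair_alt (fullList : List (String × Int × Int × Bool)) (segmented : Bool) (tagScheme : String) (onlyNP : Bool) : List String :=
  -- Python's 'bmes = tagScheme == "BMES"' is inlined as the condition 'tagScheme = "BMES"';
  -- the final list comprehension formats the accumulated (word, tag) token stream.
  (fullList.foldl (fun (toks : List (String × String)) chunk =>
    if chunk.2.2.2 then
      let pr := pvRsplit1 (PySem.Str.stripChars chunk.1 "[@$]").toList
      let label := if onlyNP then "NP" else PySem.Str.stripChars (String.ofList pr.2) "*"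
      let words := if segmented then PySem.Str.split₀ (String.ofList pr.1) else pvChars (String.ofList pr.1)
      let st := words.foldl (fun (s : List (String × String) × Bool) w =>
          (s.1 ++ [(w, (if s.2 then "B-" else if tagScheme = "BMES" then "M-" else "I-") ++ label)], false)) (toks, true)
      if tagScheme = "BMES" ∧ toks.length < st.1.length then
        -- toks[-1] = (w, ('S' if t.startswith('B') else 'E') + t[1:]) : patch the last pair
        match st.1.getLast? with
        | some wt => st.1.dropLast ++
            [(wt.1, (if PySem.Str.startswith wt.2 "B" then "S" else "E") ++ String.ofList (wt.2.toList.drop 1))]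
        | none => st.1
      else st.1
    else
      let ws := if segmented then PySem.Str.split₀ chunk.1 else pvChars chunk.1
      ws.foldl (fun toks w => if w = " " then toks else toks ++ [(w, "O")]) toks) []).map
    (fun p => p.1 ++ " " ++ p.2 ++ "\n")

-- ===== PRECONDITION & SPEC =====
-- A (and B) raise ValueError unpacking rsplit('#', 1) when a tagged chunk, after stripping
-- '[@$]' characters, contains no '#'; Pre_ excludes exactly those inputs.
def Pre_turnFullListToOutputPair (fullList : List (String × Int × Int × Bool)) (segmented : Bool) (tagScheme : String) (onlyNP : Bool) : Prop :=
  fullList.all (fun c => !c.2.2.2 || (PySem.Str.stripChars c.1 "[@$]").toList.contains '#') = true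
instance (fullList : List (String × Int × Int × Bool)) (segmented : Bool) (tagScheme : String) (onlyNP : Bool) : Decidable (Pre_turnFullListToOutputPair fullList segmented tagScheme onlyNP) := by unfold Pre_turnFullListToOutputPair; infer_instance

def pvWitness_turnFullListToOutputPair : (List (String × Int × Int × Bool)) × Bool × String × Bool :=
  ([("[@New York#NP]", 0, 1, true), ("runs fast", 2, 3, false)], true, "BMES", false)

def Spec_turnFullListToOutputPair (fullList : List (String × Int × Int × Bool)) (segmented : Bool) (tagScheme : String) (onlyNP : Bool) (out : List String) : Prop := out = turnFullListToOutputPair_alt fullList segmented tagScheme onlyNP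
instance (fullList : List (String × Int × Int × Bool)) (segmented : Bool) (tagScheme : String) (onlyNP : Bool) (out : List String) : Decidable (Spec_turnFullListToOutputPair fullList segmented tagScheme onlyNP out) := by unfold Spec_turnFullListToOutputPair; infer_instance

-- ===== CLAIM (what is proved, stated in full; the proofs are below) =====
def Claim_equal_turnFullListToOutputPair : Prop := ∀ (fullList : List (String × Int × Int × Bool)) (segmented : Bool) (tagScheme : String) (onlyNP : Bool), Dom_turnFullListToOutputPair fullList segmented tagScheme onlyNP → Pre_turnFullListToOutputPair fullList segmented tagScheme onlyNP → Spec_turnFullListToOutputPair fullList segmented tagScheme onlyNP (turnFullListToOutputPair fullList segmented tagScheme onlyNP)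

-- ===== LEMMAS AND PROOFS =====

-- proof-only helpers: the per-chunk token list B's stream accumulates
def pvEmit (mid label : String) : Bool → List String → List (String × String)
  | _, [] => []
  | first, w :: r => (w, (if first then "B-" else mid) ++ label) :: pvEmit mid label false r

def pvPatch (l : List (String × String)) : List (String × String) :=
  match l.getLast? with
  | some wt => l.dropLast ++
      [(wt.1, (if PySem.Str.startswith wt.2 "B" then "S" else "E") ++ String.ofList (wt.2.toList.drop 1))]
  | none => l

def pvChunkToks (tagScheme label : String) (words : List String) : List (String × String) :=
  if tagScheme = "BMES" then pvPatch (pvEmit "M-" label true words)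
  else pvEmit "I-" label true words

def pvPrefixes (tagScheme : String) (n : Nat) : List String :=
  if tagScheme = "BMES" then
    if n = 1 then ["S"] else ["B"] ++ List.replicate (n - 2) "M" ++ ["E"]
  else ["B"] ++ List.replicate (n - 1) "I"

theorem foldl_append_singleton {α β : Type} (f : β → α) (l : List β) (acc : List α) :
    l.foldl (fun out x => out ++ [f x]) acc = acc ++ l.map f := by
  induction l generalizing acc with
  | nil => simp
  | cons x xs ih => simp [ih, List.append_assoc]

theorem foldl_skip_eq_filter_map {α : Type} (f : String → α) (l : List String) (acc : List α) :
    l.foldl (fun pl w => if w = " " then pl else pl ++ [f w]) acc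
      = acc ++ (l.filter (fun t => t ≠ " ")).map f := by
  induction l generalizing acc with
  | nil => simp
  | cons x xs ih =>
    by_cases hx : x = " " <;> simp [hx, ih, List.append_assoc]

theorem str_lit_merge (x y z w : String) (h : y ++ z = w) : x ++ y ++ z = x ++ w := by
  rw [String.append_assoc, h]

theorem foldl_chunk_eq {A B : Type} (F : List B → A → List B) (G : A → List B)
    (h : ∀ acc x, F acc x = acc ++ G x) (l : List A) (acc : List B) :
    l.foldl F acc = acc ++ (l.map G).flatten := by
  induction l generalizing acc with
  | nil => simp
  | cons x xs ih => simp [h, ih, List.append_assoc]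

theorem outputWithTagScheme_eq_zip (ws : List String) (label tagScheme : String) :
    outputWithTagScheme ws label tagScheme
      = (ws.zip (pvPrefixes tagScheme ws.length)).map
          (fun wp => wp.1 ++ " " ++ wp.2 ++ "-" ++ label ++ "\n") := by
  have hS : ∀ x : String, x ++ "S" ++ "-" = x ++ "S-" := fun x => str_lit_merge x _ _ _ rfl
  have hB : ∀ x : String, x ++ "B" ++ "-" = x ++ "B-" := fun x => str_lit_merge x _ _ _ rfl
  have hM : ∀ x : String, x ++ "M" ++ "-" = x ++ "M-" := fun x => str_lit_merge x _ _ _ rfl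
  have hE : ∀ x : String, x ++ "E" ++ "-" = x ++ "E-" := fun x => str_lit_merge x _ _ _ rfl
  have hI : ∀ x : String, x ++ "I" ++ "-" = x ++ "I-" := fun x => str_lit_merge x _ _ _ rfl
  unfold outputWithTagScheme pvPrefixes
  by_cases hts : tagScheme = "BMES"
  · simp only [if_pos hts]
    by_cases h1 : ws.length = 1
    · simp only [if_pos h1]
      match ws, h1 with
      | [w], _ => simp [hS]
    · simp only [if_neg h1]
      rw [foldl_append_singleton]
      apply List.ext_getElem
      · simp only [List.nil_append, List.length_map, List.length_range, List.length_zip,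
          List.length_append, List.length_replicate, List.length_cons, List.length_nil]
        omega
      · intro i hi hi'
        have hin : i < ws.length := by simpa using hi
        have hn2 : 2 ≤ ws.length := by
          rcases Nat.lt_or_ge ws.length 2 with h | h
          · interval_cases h' : ws.length <;> omega
          · exact h
        have hpre : (["B"] ++ List.replicate (ws.length - 2) "M" ++ ["E"])[i]'(by
              simp [List.length_replicate]; omega)
            = if i = 0 then "B" else if i = ws.length - 1 then "E" else "M" := by
          rcases eq_or_ne i 0 with h0 | h0
          · subst h0; simp
          · rcases eq_or_ne i (ws.length - 1) with hl | hl
            · rw [List.getElem_append_right (by simp [List.length_replicate]; omega)]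
              simp [List.length_replicate, hl]
              omega
            · rw [List.getElem_append_left (by simp [List.length_replicate]; omega),
                  List.getElem_append_right (by simp; omega)]
              simp [List.getElem_replicate, h0, hl]
        simp only [List.nil_append, List.getElem_map, List.getElem_range, List.getElem_zip,
          hpre, List.getD_eq_getElem ws "" hin]
        rcases eq_or_ne i 0 with h0 | h0
        · simp [h0, hB]
        · have hne : ws.length - 1 ≠ 0 := by omega
          rcases eq_or_ne i (ws.length - 1) with hl | hl
          · simp [hl, hne, hE]
          · simp [h0, hl, hM]
  · simp only [if_neg hts]
    rw [foldl_append_singleton]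
    apply List.ext_getElem
    · simp only [List.nil_append, List.length_map, List.length_range, List.length_zip,
        List.length_append, List.length_replicate, List.length_cons, List.length_nil]
      omega
    · intro i hi hi'
      have hin : i < ws.length := by simpa using hi
      have hpre : (["B"] ++ List.replicate (ws.length - 1) "I")[i]'(by
            simp [List.length_replicate]; omega)
          = if i = 0 then "B" else "I" := by
        rcases eq_or_ne i 0 with h0 | h0
        · subst h0; simp
        · rw [List.getElem_append_right (by simp; omega)]
          simp [List.getElem_replicate, h0]
      simp only [List.nil_append, List.getElem_map, List.getElem_range, List.getElem_zip,
        hpre, List.getD_eq_getElem ws "" hin]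
      rcases eq_or_ne i 0 with h0 | h0
      · simp [h0, hB]
      · simp [h0, hI]

-- B's inner word fold produces acc ++ pvEmit …
theorem foldl_emit (mid label : String) (words : List String)
    (toks : List (String × String)) (first : Bool) :
    words.foldl (fun (s : List (String × String) × Bool) w =>
        (s.1 ++ [(w, (if s.2 then "B-" else mid) ++ label)], false)) (toks, first)
      = (toks ++ pvEmit mid label first words, first && words.isEmpty) := by
  induction words generalizing toks first with
  | nil => simp [pvEmit]
  | cons w r ih => simp [pvEmit, ih, List.append_assoc]

theorem pvEmit_length (mid label : String) (first : Bool) (words : List String) :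
    (pvEmit mid label first words).length = words.length := by
  induction words generalizing first with
  | nil => rfl
  | cons w r ih => simp [pvEmit, ih]

theorem pvEmit_false (mid label : String) (words : List String) :
    pvEmit mid label false words = words.map (fun w => (w, mid ++ label)) := by
  induction words with
  | nil => rfl
  | cons w r ih => simp [pvEmit, ih]

theorem pvPatch_concat (acc l' : List (String × String)) (b : String × String) :
    pvPatch (acc ++ (l' ++ [b])) = acc ++ pvPatch (l' ++ [b]) := by
  rw [← List.append_assoc]
  simp [pvPatch, List.append_assoc]

theorem pvPatch_append {acc l : List (String × String)} (h : l ≠ []) :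
    pvPatch (acc ++ l) = acc ++ pvPatch l := by
  obtain ⟨l', b, rfl⟩ : ∃ l' b, l = l' ++ [b] :=
    ⟨l.dropLast, l.getLast h, (List.dropLast_append_getLast h).symm⟩
  exact pvPatch_concat acc l' b

theorem chars_sw_B (cs : List Char) : PySem.Chars.startswith ('B' :: cs) ['B'] = true := by
  rw [PySem.Chars.startswith_iff]; exact ⟨cs, rfl⟩

theorem chars_sw_M (cs : List Char) : PySem.Chars.startswith ('M' :: cs) ['B'] = false := by
  rw [Bool.eq_false_iff]
  intro hT
  rw [PySem.Chars.startswith_iff] at hT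
  obtain ⟨t, ht⟩ := hT
  simp at ht

theorem ofList_cons_str (c : Char) (L : String) :
    String.ofList (c :: L.toList) = String.ofList [c] ++ L := by
  rw [show c :: L.toList = [c] ++ L.toList from rfl, String.ofList_append, String.ofList_toList]

theorem litDash : String.ofList ['-'] = "-" := by decide

theorem strJoin (p q r : String) (h : p ++ q = r) (L : String) : p ++ (q ++ L) = r ++ L := by
  rw [← String.append_assoc, h]

theorem sS (L : String) : ("S" : String) ++ ("-" ++ L) = "S-" ++ L := strJoin _ _ _ (by decide) L
theorem sE (L : String) : ("E" : String) ++ ("-" ++ L) = "E-" ++ L := strJoin _ _ _ (by decide) L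
theorem sB2 (L : String) : ("B" : String) ++ ("-" ++ L) = "B-" ++ L := strJoin _ _ _ (by decide) L
theorem sM2 (L : String) : ("M" : String) ++ ("-" ++ L) = "M-" ++ L := strJoin _ _ _ (by decide) L
theorem sI2 (L : String) : ("I" : String) ++ ("-" ++ L) = "I-" ++ L := strJoin _ _ _ (by decide) L

theorem zip_replicate_map {α : Type} (x : String) (rest : List α) :
    rest.zip (List.replicate rest.length x) = rest.map (fun w => (w, x)) := by
  induction rest with
  | nil => rfl
  | cons a r ih => simp [List.replicate_succ, ih]

-- the per-chunk token list: mid tails for BMES, patched at the end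
theorem patch_mid (L : String) (rest : List String) (h : rest ≠ []) :
    pvPatch (rest.map (fun x => (x, "M-" ++ L)))
      = (rest.zip (List.replicate (rest.length - 1) "M" ++ ["E"])).map
          (fun wp => (wp.1, wp.2 ++ "-" ++ L)) := by
  induction rest with
  | nil => exact absurd rfl h
  | cons x r ih =>
    cases r with
    | nil =>
      simp [pvPatch, chars_sw_M, String.toList_append, ofList_cons_str, litDash,
        String.append_assoc, sE]
    | cons y r' =>
      have hr : (y :: r').map (fun x => (x, "M-" ++ L)) ≠ [] := by simp
      have step : ((x :: y :: r').map (fun x => (x, "M-" ++ L)))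
          = [(x, "M-" ++ L)] ++ (y :: r').map (fun x => (x, "M-" ++ L)) := by simp
      rw [step, pvPatch_append hr, ih (by simp)]
      have hrep : List.replicate ((x :: y :: r').length - 1) "M"
          = "M" :: List.replicate ((y :: r').length - 1) "M" := by
        simp [List.replicate_succ]
      rw [hrep]
      simp [String.append_assoc, sM2]

theorem chunkToks_eq_zip (tagScheme L : String) (words : List String) :
    pvChunkToks tagScheme L words
      = (words.zip (pvPrefixes tagScheme words.length)).map
          (fun wp => (wp.1, wp.2 ++ "-" ++ L)) := by
  unfold pvChunkToks pvPrefixes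
  by_cases hts : tagScheme = "BMES"
  · simp only [if_pos hts]
    cases words with
    | nil => simp [pvEmit, pvPatch]
    | cons w rest =>
      cases rest with
      | nil =>
        simp [pvEmit, pvPatch, chars_sw_B, String.toList_append, ofList_cons_str, litDash,
          String.append_assoc, sS]
      | cons y r' =>
        have hemit : pvEmit "M-" L true (w :: y :: r')
            = (w, "B-" ++ L) :: (y :: r').map (fun x => (x, "M-" ++ L)) := by
          simp [pvEmit, pvEmit_false]
        simp only [hemit, List.length_cons]
        have hr : (y :: r').map (fun x => (x, "M-" ++ L)) ≠ [] := by simp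
        have step : (w, "B-" ++ L) :: (y :: r').map (fun x => (x, "M-" ++ L))
            = [(w, "B-" ++ L)] ++ (y :: r').map (fun x => (x, "M-" ++ L)) := by simp
        rw [step, pvPatch_append hr, patch_mid L (y :: r') (by simp)]
        have h2 : r'.length + 1 + 1 - 2 = (y :: r').length - 1 := by simp
        simp [h2, String.append_assoc, sB2]
  · simp only [if_neg hts]
    cases words with
    | nil => simp [pvEmit]
    | cons w rest =>
      have hemit : pvEmit "I-" L true (w :: rest)
          = (w, "B-" ++ L) :: rest.map (fun x => (x, "I-" ++ L)) := by
        simp [pvEmit, pvEmit_false]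
      simp only [hemit, List.length_cons, Nat.add_sub_cancel]
      simp [zip_replicate_map, String.append_assoc, sB2, sI2]

-- formatting a chunk's token list equals A's per-chunk output
theorem fmt_chunk (tagScheme L : String) (words : List String) :
    (pvChunkToks tagScheme L words).map (fun p => p.1 ++ " " ++ p.2 ++ "\n")
      = outputWithTagScheme words L tagScheme := by
  rw [chunkToks_eq_zip, outputWithTagScheme_eq_zip, List.map_map]
  apply List.map_congr_left
  intro wp _
  simp [String.append_assoc]

-- B's tagged-chunk step: emit then boundary-patch, as one append
theorem step_tagged (tagScheme label : String) (words : List String)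
    (acc : List (String × String)) :
    (let st := words.foldl (fun (s : List (String × String) × Bool) w =>
        (s.1 ++ [(w, (if s.2 then "B-" else if tagScheme = "BMES" then "M-" else "I-") ++ label)],
          false)) (acc, true)
     if tagScheme = "BMES" ∧ acc.length < st.1.length then
       match st.1.getLast? with
       | some wt => st.1.dropLast ++
           [(wt.1, (if PySem.Str.startswith wt.2 "B" then "S" else "E")
               ++ String.ofList (wt.2.toList.drop 1))]
       | none => st.1
     else st.1)
    = acc ++ pvChunkToks tagScheme label words := by
  show (let st := words.foldl (fun (s : List (String × String) × Bool) w =>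
        (s.1 ++ [(w, (if s.2 then "B-" else if tagScheme = "BMES" then "M-" else "I-") ++ label)],
          false)) (acc, true)
      if tagScheme = "BMES" ∧ acc.length < st.1.length then pvPatch st.1 else st.1)
      = acc ++ pvChunkToks tagScheme label words
  by_cases hts : tagScheme = "BMES"
  · simp only [hts, foldl_emit, pvChunkToks, true_and, if_pos]
    cases words with
    | nil => simp [pvEmit, pvPatch]
    | cons w rest =>
      have hne : pvEmit "M-" label true (w :: rest) ≠ [] := by simp [pvEmit]
      have hlt : acc.length < (acc ++ pvEmit "M-" label true (w :: rest)).length := by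
        simp [pvEmit_length]
      rw [if_pos hlt, pvPatch_append hne]
  · simp only [foldl_emit, pvChunkToks, hts, false_and, if_false]

-- ===== VERDICT (by name: the statement is the Claim_ definition above) =====
theorem turnFullListToOutputPair_spec : Claim_equal_turnFullListToOutputPair := by
  intro fullList segmented tagScheme onlyNP _ _
  unfold Spec_turnFullListToOutputPair turnFullListToOutputPair turnFullListToOutputPair_alt
  rw [foldl_chunk_eq _ (fun chunk =>
      if chunk.2.2.2 then
        outputWithTagScheme
          (if segmented then PySem.Str.split₀ (String.ofList (pvRsplit1 (PySem.Str.stripChars chunk.1 "[@$]").toList).1)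
           else pvChars (String.ofList (pvRsplit1 (PySem.Str.stripChars chunk.1 "[@$]").toList).1))
          (if onlyNP then "NP"
           else PySem.Str.stripChars (String.ofList (pvRsplit1 (PySem.Str.stripChars chunk.1 "[@$]").toList).2) "*")
          tagScheme
      else
        (((if segmented then PySem.Str.split₀ chunk.1 else pvChars chunk.1).filter
            (fun t => t ≠ " ")).map (fun w => w ++ " " ++ "O\n")))
    (by
      intro acc chunk
      by_cases ht : chunk.2.2.2
      · simp [ht]
      · simp only [ht, Bool.false_eq_true, ite_false]
        exact foldl_skip_eq_filter_map _ _ _)]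
  rw [foldl_chunk_eq _ (fun chunk =>
      if chunk.2.2.2 then
        pvChunkToks tagScheme
          (if onlyNP then "NP"
           else PySem.Str.stripChars (String.ofList (pvRsplit1 (PySem.Str.stripChars chunk.1 "[@$]").toList).2) "*")
          (if segmented then PySem.Str.split₀ (String.ofList (pvRsplit1 (PySem.Str.stripChars chunk.1 "[@$]").toList).1)
           else pvChars (String.ofList (pvRsplit1 (PySem.Str.stripChars chunk.1 "[@$]").toList).1))
      else
        ((if segmented then PySem.Str.split₀ chunk.1 else pvChars chunk.1).filter
            (fun t => t ≠ " ")).map (fun w => (w, "O")))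
    (by
      intro acc chunk
      by_cases ht : chunk.2.2.2
      · simp only [ht, if_true]
        exact step_tagged tagScheme _ _ acc
      · simp only [ht, Bool.false_eq_true, ite_false]
        exact foldl_skip_eq_filter_map _ _ _)]
  simp only [List.nil_append, List.map_flatten, List.map_map]
  congr 1
  apply List.map_congr_left
  intro chunk _
  by_cases ht : chunk.2.2.2
  · simp only [ht, if_true, Function.comp]
    exact (fmt_chunk tagScheme _ _).symm
  · simp only [ht, Bool.false_eq_true, ite_false, Function.comp, List.map_map]
    apply List.map_congr_left
    intro w _
    exact (str_lit_merge (w ++ " ") "O" "\n" "O\n" (by decide)).symm
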